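-- pv_equiv track=rewrite | github.com/Alanjul/codeSignal | AlternateTraversal.py | usual_traversal
-- ===== SOURCE A (Python) =====
-- def usual_traversal(arrays):
--     """Return a array of  new array traversing from the beginning, for each
--     subsequent pair of elements"""
--     n = len(arrays)
--     mid = n//2
--     new_arr = [arrays[mid]]
--     left = mid -1
--     right = mid + 1
--     #loop through the array for left to right
--     while left >= 0 or right < n:
--         left_array = []
--         #alternate left in two steps
--         for _ in range(2):
--             if left >= 0:
--                 left_array.append(arrays[left])
--                 left -=1
--
--         new_arr.extend(left_array[::-1])
--
--         #alternate right in 2 steps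
--         for _ in range(2):
--             if right < n:
--                 new_arr.append(arrays[right])
--                 right += 1
--
--     return new_arr
-- ===== SOURCE B (Python) =====
-- def usual_traversal(arrays):
--     """Two side-scans that precompute ascending left pairs and right pairs,
--     then a merge that interleaves the blocks around the middle element."""
--     n = len(arrays)
--     mid = n // 2
--     result = [arrays[mid]]
--     left_blocks = []
--     i = mid - 1
--     while i >= 0:
--         left_blocks.append(arrays[max(i - 1, 0):i + 1])
--         i -= 2
--     right_blocks = []
--     j = mid + 1
--     while j < n:
--         right_blocks.append(arrays[j:j + 2])
--         j += 2
--     left_blocks.reverse()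
--     right_blocks.reverse()
--     while left_blocks or right_blocks:
--         if left_blocks:
--             result += left_blocks.pop()
--         if right_blocks:
--             result += right_blocks.pop()
--     return result
-- ===== Notes on version B (the rewrite author's own statement) =====
-- stated objective: alternative
-- what changed: A's single interleaved middle-out while-loop (taking up to two left then up to two right per iteration) is replaced by two independent side-scans that precompute the list of left pair-blocks (as ascending slices) and the list of right pair-blocks, followed by a separate merge loop that interleaves the two block lists.
-- outside the precondition, e.g. on usual_traversal([]): A raises IndexError, B raises IndexError
import Mathlib
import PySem

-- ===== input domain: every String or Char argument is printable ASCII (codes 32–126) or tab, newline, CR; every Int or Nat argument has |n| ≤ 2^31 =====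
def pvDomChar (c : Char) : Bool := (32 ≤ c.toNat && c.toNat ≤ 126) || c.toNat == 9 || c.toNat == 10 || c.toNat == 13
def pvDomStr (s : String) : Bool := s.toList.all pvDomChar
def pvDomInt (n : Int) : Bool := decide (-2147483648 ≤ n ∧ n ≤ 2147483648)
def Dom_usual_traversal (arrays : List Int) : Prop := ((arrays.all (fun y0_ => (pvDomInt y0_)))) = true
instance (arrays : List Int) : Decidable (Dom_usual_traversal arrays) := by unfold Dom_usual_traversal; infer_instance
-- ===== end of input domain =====

-- B replaces A's single interleaved middle-out loop by two independent side-scans that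
-- precompute the left/right pair blocks, then a merge of the two block lists (objective: alternative).
-- Pre_ excludes only the empty list, on which Python A raises IndexError at arrays[mid].
-- Fuel (arrays.length + 1) is a pure totality guard: each while-loop runs at most that many iterations.

-- ===== PORT A =====
-- while left >= 0 or right < n: take up to two from the left (then reversed), up to two from the right.
-- arrays[i] is always in range when read (0 ≤ i < n), so pyGetD is exact here.
def usual_traversal.loopA (arrays : List Int) (n : Int) : Nat → Int → Int → List Int → List Int
  | 0, _, _, acc => acc
  | fuel + 1, left, right, acc =>
    if 0 ≤ left ∨ right < n then
      -- for _ in range(2): if left >= 0: left_array.append(arrays[left]); left -= 1   (unrolled)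
      let la1 : List Int := if 0 ≤ left then [PySem.List.pyGetD arrays left 0] else []
      let l1  : Int      := if 0 ≤ left then left - 1 else left
      let la2 : List Int := if 0 ≤ l1 then la1 ++ [PySem.List.pyGetD arrays l1 0] else la1
      let l2  : Int      := if 0 ≤ l1 then l1 - 1 else l1
      -- new_arr.extend(left_array[::-1])  ([::-1] is reverse: PySem.List.slice?_none_none_neg_one)
      let acc1 := acc ++ la2.reverse
      -- for _ in range(2): if right < n: new_arr.append(arrays[right]); right += 1   (unrolled)
      let acc2 := if right < n then acc1 ++ [PySem.List.pyGetD arrays right 0] else acc1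
      let r1  : Int := if right < n then right + 1 else right
      let acc3 := if r1 < n then acc2 ++ [PySem.List.pyGetD arrays r1 0] else acc2
      let r2  : Int := if r1 < n then r1 + 1 else r1
      usual_traversal.loopA arrays n fuel l2 r2 acc3
    else acc

def usual_traversal (arrays : List Int) : List Int :=
  let n : Int := arrays.length
  let mid : Int := PySem.Int.floordiv n 2
  usual_traversal.loopA arrays n (arrays.length + 1) (mid - 1) (mid + 1) [PySem.List.pyGetD arrays mid 0]

-- ===== PORT B =====
-- while i >= 0: left_blocks.append(arrays[max(i-1,0):i+1]); i -= 2
def usual_traversal_alt.leftBlocks (arrays : List Int) : Nat → Int → List (List Int)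
  | 0, _ => []
  | fuel + 1, i =>
    if 0 ≤ i then
      PySem.List.slice arrays (some (max (i - 1) 0)) (some (i + 1)) :: usual_traversal_alt.leftBlocks arrays fuel (i - 2)
    else []

-- while j < n: right_blocks.append(arrays[j:j+2]); j += 2
def usual_traversal_alt.rightBlocks (arrays : List Int) (n : Int) : Nat → Int → List (List Int)
  | 0, _ => []
  | fuel + 1, j =>
    if j < n then
      PySem.List.slice arrays (some j) (some (j + 2)) :: usual_traversal_alt.rightBlocks arrays n fuel (j + 2)
    else []

-- left_blocks.reverse(); right_blocks.reverse(); then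
-- while left_blocks or right_blocks: pop() from each nonempty side and extend result
-- (getLastD []/dropLast encode the two guarded end-pops: popping nothing extends result by []).
def usual_traversal_alt.merge : Nat → List (List Int) → List (List Int) → List Int → List Int
  | 0, _, _, res => res
  | fuel + 1, ls, rs, res =>
    if ls ≠ [] ∨ rs ≠ [] then
      usual_traversal_alt.merge fuel ls.dropLast rs.dropLast ((res ++ ls.getLastD []) ++ rs.getLastD [])
    else res

def usual_traversal_alt (arrays : List Int) : List Int :=
  let n : Int := arrays.length
  let mid : Int := PySem.Int.floordiv n 2
  usual_traversal_alt.merge (arrays.length + 1)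
    (usual_traversal_alt.leftBlocks arrays (arrays.length + 1) (mid - 1)).reverse
    (usual_traversal_alt.rightBlocks arrays n (arrays.length + 1) (mid + 1)).reverse
    [PySem.List.pyGetD arrays mid 0]

-- ===== PRECONDITION & SPEC =====
-- Pre_ excludes exactly the empty list: Python A raises IndexError there (arrays[mid] on n = 0).
def Pre_usual_traversal (arrays : List Int) : Prop := arrays ≠ []
instance (arrays : List Int) : Decidable (Pre_usual_traversal arrays) := by unfold Pre_usual_traversal; infer_instance
def pvWitness_usual_traversal : List Int := [1, 2, 3, 4, 5]

def Spec_usual_traversal (arrays : List Int) (out : List Int) : Prop := out = usual_traversal_alt arrays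
instance (arrays : List Int) (out : List Int) : Decidable (Spec_usual_traversal arrays out) := by unfold Spec_usual_traversal; infer_instance

-- ===== CLAIM (what is proved, stated in full; the proofs are below) =====
def Claim_equal_usual_traversal : Prop := ∀ (arrays : List Int), Dom_usual_traversal arrays → Pre_usual_traversal arrays → Spec_usual_traversal arrays (usual_traversal arrays)

-- ===== LEMMAS AND PROOFS =====

lemma drop_take_pair (xs : List Int) (k : Nat) (h : k + 1 < xs.length) :
    (xs.drop k).take 2 = [xs[k], xs[k + 1]] := by
  rw [List.drop_eq_getElem_cons (show k < xs.length by omega)]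
  rw [show List.take 2 (xs[k] :: List.drop (k+1) xs) = xs[k] :: List.take 1 (List.drop (k+1) xs) from rfl]
  rw [List.drop_eq_getElem_cons h]
  rfl

lemma take_one_eq (xs : List Int) (h : 0 < xs.length) : xs.take 1 = [xs[0]] := by
  cases xs with
  | nil => simp at h
  | cons a t => rfl

lemma leftBlocks_neg (xs : List Int) (f : Nat) (i : Int) (h : ¬ 0 ≤ i) :
    usual_traversal_alt.leftBlocks xs f i = [] := by
  cases f with
  | zero => rfl
  | succ f => simp [usual_traversal_alt.leftBlocks, h]

lemma rightBlocks_ge (xs : List Int) (n : Int) (f : Nat) (j : Int) (h : ¬ j < n) :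
    usual_traversal_alt.rightBlocks xs n f j = [] := by
  cases f with
  | zero => rfl
  | succ f => simp [usual_traversal_alt.rightBlocks, h]

-- the left block B slices equals the (reversed) pair A collects going down from i
lemma lblk (xs : List Int) (i : Int) (h0 : 0 ≤ i) (hi : i < (xs.length : Int)) :
    PySem.List.slice xs (some (max (i - 1) 0)) (some (i + 1)) =
      ((if 0 ≤ i - 1 then [PySem.List.pyGetD xs i 0] ++ [PySem.List.pyGetD xs (i - 1) 0]
        else [PySem.List.pyGetD xs i 0])).reverse := by
  by_cases h1 : (0 : Int) ≤ i - 1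
  · have hmax : max (i - 1) 0 = i - 1 := by omega
    rw [hmax, PySem.List.slice_toNat _ (by omega) (by omega)]
    have hd : (i + 1).toNat - (i - 1).toNat = 2 := by omega
    rw [hd, drop_take_pair xs (i - 1).toNat (by omega)]
    rw [PySem.List.pyGetD_eq_getElem xs (i := i) 0 (by omega) (by omega),
        PySem.List.pyGetD_eq_getElem xs (i := i - 1) 0 (by omega) (by omega)]
    simp [show (1:Int) ≤ i from by omega, show i.toNat - 1 + 1 = i.toNat from by omega]
  · have hi0 : i = 0 := by omega
    subst hi0
    have hmax : max ((0 : Int) - 1) 0 = 0 := by omega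
    rw [hmax, PySem.List.slice_toNat _ (by omega) (by omega)]
    norm_num
    rw [take_one_eq xs (by omega)]
    rw [PySem.List.pyGetD_eq_getElem xs (i := 0) 0 (by omega) (by omega)]
    rfl

-- the right block B slices equals the (up to two) elements A appends going up from r
lemma rblk (xs : List Int) (n r : Int) (hn : n = (xs.length : Int)) (h0 : 0 ≤ r) (hr : r < n) :
    PySem.List.slice xs (some r) (some (r + 2)) =
      [PySem.List.pyGetD xs r 0] ++ (if r + 1 < n then [PySem.List.pyGetD xs (r + 1) 0] else []) := by
  subst hn
  rw [PySem.List.slice_toNat _ h0 (by omega)]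
  have hd : (r + 2).toNat - r.toNat = 2 := by omega
  rw [hd]
  by_cases h1 : r + 1 < (xs.length : Int)
  · rw [drop_take_pair xs r.toNat (by omega)]
    rw [PySem.List.pyGetD_eq_getElem xs (i := r) 0 (by omega) (by omega),
        PySem.List.pyGetD_eq_getElem xs (i := r + 1) 0 (by omega) (by omega)]
    have e : (r + 1).toNat = r.toNat + 1 := by omega
    simp [h1, e]
  · rw [List.drop_eq_getElem_cons (by omega), show xs.drop (r.toNat + 1) = [] from by
      rw [List.drop_eq_nil_iff]; omega]
    rw [PySem.List.pyGetD_eq_getElem xs (i := r) 0 (by omega) (by omega)]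
    simp [h1]

lemma loopA_eq_merge (arrays : List Int) : ∀ (f : Nat) (left right : Int) (acc : List Int),
    (left + 1).toNat < f → ((arrays.length : Int) - right).toNat < f →
    left < (arrays.length : Int) → 0 ≤ right →
    usual_traversal.loopA arrays (arrays.length : Int) f left right acc
      = usual_traversal_alt.merge f (usual_traversal_alt.leftBlocks arrays f left).reverse
          (usual_traversal_alt.rightBlocks arrays (arrays.length : Int) f right).reverse acc := by
  intro f
  induction f with
  | zero => intro left right acc hfl hfr hl hr; omega
  | succ f IH =>
    intro left right acc hfl hfr hl hr
    by_cases hg : 0 ≤ left ∨ right < (arrays.length : Int)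
    case neg =>
      push_neg at hg
      rw [usual_traversal.loopA, if_neg (by push_neg; exact hg)]
      rw [leftBlocks_neg _ _ _ (by omega), rightBlocks_ge _ _ _ _ (by omega)]
      rw [usual_traversal_alt.merge]
      simp
    case pos =>
      have hf1 : 1 ≤ f := by
        rcases hg with h | h <;> omega
      rw [usual_traversal.loopA, if_pos hg]
      have hne : (usual_traversal_alt.leftBlocks arrays (f + 1) left).reverse ≠ [] ∨
          (usual_traversal_alt.rightBlocks arrays (arrays.length : Int) (f + 1) right).reverse ≠ [] := by
        rcases hg with h | h
        · left; rw [usual_traversal_alt.leftBlocks, if_pos h]; simp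
        · right; rw [usual_traversal_alt.rightBlocks, if_pos h]; simp
      rw [usual_traversal_alt.merge, if_pos hne]
      by_cases h0l : (0 : Int) ≤ left
      · have hbL := lblk arrays left h0l hl
        conv_rhs => rw [usual_traversal_alt.leftBlocks, if_pos h0l]
        by_cases hrn : right < (arrays.length : Int)
        · have hbR := rblk arrays _ right rfl hr hrn
          conv_rhs => rw [usual_traversal_alt.rightBlocks, if_pos hrn]
          simp only [List.reverse_cons, List.dropLast_concat, List.getLastD_concat]
          by_cases h1 : (0 : Int) ≤ left - 1
          · by_cases h2 : right + 1 < (arrays.length : Int)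
            · simp only [h0l, h1, hrn, h2, if_true]
              rw [IH _ _ _ (by omega) (by omega) (by omega) (by omega)]
              rw [hbL, hbR]
              simp only [h1, h2, if_true]
              rw [show left - 1 - 1 = left - 2 from by ring,
                  show right + 1 + 1 = right + 2 from by ring]
              all_goals simp [List.append_assoc]
            · simp only [h0l, h1, hrn, h2, if_true, if_false]
              rw [IH _ _ _ (by omega) (by omega) (by omega) (by omega)]
              rw [rightBlocks_ge _ _ f (right + 1) (by omega),
                  rightBlocks_ge _ _ f (right + 2) (by omega)]
              rw [hbL, hbR]
              simp only [h1, h2, if_true, if_false]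
              rw [show left - 1 - 1 = left - 2 from by ring]
              all_goals simp [List.append_assoc]
          · by_cases h2 : right + 1 < (arrays.length : Int)
            · simp only [h0l, h1, hrn, h2, if_true, if_false]
              rw [IH _ _ _ (by omega) (by omega) (by omega) (by omega)]
              rw [leftBlocks_neg _ f (left - 1) (by omega), leftBlocks_neg _ f (left - 2) (by omega)]
              rw [hbL, hbR]
              simp only [h1, h2, if_true, if_false]
              rw [show right + 1 + 1 = right + 2 from by ring]
              all_goals simp [List.append_assoc]
            · simp only [h0l, h1, hrn, h2, if_true, if_false]
              rw [IH _ _ _ (by omega) (by omega) (by omega) (by omega)]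
              rw [leftBlocks_neg _ f (left - 1) (by omega), leftBlocks_neg _ f (left - 2) (by omega)]
              rw [rightBlocks_ge _ _ f (right + 1) (by omega),
                  rightBlocks_ge _ _ f (right + 2) (by omega)]
              rw [hbL, hbR]
              simp only [h1, h2, if_true, if_false]
              all_goals simp [List.append_assoc]
        · simp only [h0l, hrn, if_true, if_false]
          conv_rhs => rw [rightBlocks_ge _ _ (f + 1) right hrn]
          simp only [List.reverse_cons, List.reverse_nil, List.dropLast_concat, List.getLastD_concat,
            List.dropLast_nil, List.getLastD_nil, List.append_nil]
          by_cases h1 : (0 : Int) ≤ left - 1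
          · simp only [h1, if_true]
            rw [IH _ _ _ (by omega) (by omega) (by omega) (by omega)]
            rw [rightBlocks_ge _ _ f right hrn]
            rw [hbL]
            simp only [h1, if_true]
            rw [show left - 1 - 1 = left - 2 from by ring]
            all_goals simp [List.append_assoc]
          · simp only [h1, if_false]
            rw [IH _ _ _ (by omega) (by omega) (by omega) (by omega)]
            rw [leftBlocks_neg _ f (left - 1) (by omega), leftBlocks_neg _ f (left - 2) (by omega)]
            rw [rightBlocks_ge _ _ f right hrn]
            rw [hbL]
            simp only [h1, if_false]
            all_goals simp [List.append_assoc]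
      · have hrn : right < (arrays.length : Int) := by tauto
        have hbR := rblk arrays _ right rfl hr hrn
        conv_rhs => rw [leftBlocks_neg _ (f + 1) left h0l, usual_traversal_alt.rightBlocks, if_pos hrn]
        simp only [List.reverse_cons, List.reverse_nil, List.dropLast_concat, List.getLastD_concat,
          List.dropLast_nil, List.getLastD_nil, List.nil_append, h0l, hrn, if_true, if_false]
        by_cases h2 : right + 1 < (arrays.length : Int)
        · simp only [h2, if_true]
          rw [IH _ _ _ (by omega) (by omega) (by omega) (by omega)]
          rw [leftBlocks_neg _ f left h0l]
          rw [hbR]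
          simp only [h2, if_true]
          rw [show right + 1 + 1 = right + 2 from by ring]
          all_goals simp [List.append_assoc]
        · simp only [h2, if_false]
          rw [IH _ _ _ (by omega) (by omega) (by omega) (by omega)]
          rw [leftBlocks_neg _ f left h0l]
          rw [rightBlocks_ge _ _ f (right + 1) (by omega), rightBlocks_ge _ _ f (right + 2) (by omega)]
          rw [hbR]
          simp only [h2, if_false]
          all_goals simp [List.append_assoc]

-- ===== VERDICT (by name: the statement is the Claim_ definition above) =====
theorem usual_traversal_spec : Claim_equal_usual_traversal := by
  intro arrays _ _
  unfold Spec_usual_traversal usual_traversal usual_traversal_alt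
  simp only []
  have hmid : PySem.Int.floordiv (arrays.length : Int) 2 = ((arrays.length / 2 : Nat) : Int) :=
    PySem.Int.floordiv_natCast arrays.length 2
  exact loopA_eq_merge arrays _ _ _ _ (by rw [hmid]; omega) (by rw [hmid]; omega)
    (by rw [hmid]; omega) (by rw [hmid]; omega)
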